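-- pv_equiv track=rewrite | github.com/ElectrizArteUCR/ArmonizadorMIDI | ArmonizadorMIDI.py | obtener_notas_acorde
-- ===== SOURCE A (Python) =====
-- A = 9
--
-- A_SOSTENIDO = 10
--
-- B = 11
--
-- C = 12
--
-- C_SOSTENIDO = 1
--
-- D = 2
--
-- D_SOSTENIDO = 3
--
-- E = 4
--
-- F = 5
--
-- F_SOSTENIDO = 6
--
-- G = 7
--
-- G_SOSTENIDO = 8
--
-- def obtener_notas_acorde(acorde, octava):
--
--     if acorde == "A":
--         acorde = [A, C_SOSTENIDO, E]
--     elif acorde == "A#":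
--         acorde = [A_SOSTENIDO, D, F]
--     elif acorde == "B":
--         acorde = [B, D_SOSTENIDO, F_SOSTENIDO]
--     elif acorde == "C":
--         acorde = [C, E, G]
--     elif acorde == "C#":
--         acorde = [C_SOSTENIDO, F, G_SOSTENIDO]
--     elif acorde == "D":
--         acorde = [D, F_SOSTENIDO, A]
--     elif acorde == "D#":
--         acorde = [D_SOSTENIDO, G, A_SOSTENIDO]
--     elif acorde == "E":
--         acorde = [E, G_SOSTENIDO, B]
--     elif acorde == "F":
--         acorde = [F, A, C]
--     elif acorde == "F#":
--         acorde = [F_SOSTENIDO, A_SOSTENIDO, C_SOSTENIDO]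
--     elif acorde == "G":
--         acorde = [G, B, D]
--     elif acorde == "G#":
--         acorde = [G_SOSTENIDO, C, D_SOSTENIDO]
--
--     elif acorde == "Am":
--         acorde = [A, C, E]
--     elif acorde == "A#m":
--         acorde = [A_SOSTENIDO, C_SOSTENIDO, F]
--     elif acorde == "Bm":
--         acorde = [B, D, F_SOSTENIDO]
--     elif acorde == "Cm":
--         acorde = [C, D_SOSTENIDO, G]
--     elif acorde == "C#m":
--         acorde = [C_SOSTENIDO, E, G_SOSTENIDO]
--     elif acorde == "Dm":
--         acorde = [D, F, A]
--     elif acorde == "D#m":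
--         acorde = [D_SOSTENIDO, F_SOSTENIDO, A_SOSTENIDO]
--     elif acorde == "Em":
--         acorde = [E, G, B]
--     elif acorde == "Fm":
--         acorde = [F, G_SOSTENIDO, C]
--     elif acorde == "F#m":
--         acorde = [F_SOSTENIDO, A, C_SOSTENIDO]
--     elif acorde == "Gm":
--         acorde = [G, A_SOSTENIDO, D]
--     elif acorde == "G#m":
--         acorde = [G_SOSTENIDO, B, D_SOSTENIDO]
--
--     for i, nota in enumerate(acorde):
--         acorde[i] = acorde[i] + 12*octava
--
--     return acorde
-- ===== SOURCE B (Python) =====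
-- _NOTAS = {"C#": 1, "D": 2, "D#": 3, "E": 4, "F": 5, "F#": 6,
--           "G": 7, "G#": 8, "A": 9, "A#": 10, "B": 11, "C": 12}
--
--
-- def obtener_notas_acorde(acorde, octava):
--     # minor chord = trailing 'm'; triad = root, third (3 minor / 4 major), fifth (7),
--     # each wrapped back into 1..12, then shifted by the octave.
--     if acorde.endswith("m"):
--         raiz, tercera = acorde[:-1], 3
--     else:
--         raiz, tercera = acorde, 4
--     r = _NOTAS[raiz]
--     return [(v - 1) % 12 + 1 + 12 * octava for v in (r, r + tercera, r + 7)]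
-- ===== Notes on version B (the rewrite author's own statement) =====
-- stated objective: simpler
-- what changed: Replaces the 24-branch if/elif table and in-place loop with a 12-entry note dict plus an interval formula (root, root+3/4, root+7, wrapped mod 12) computed in one comprehension.
-- outside the precondition, e.g. on obtener_notas_acorde('', 0): A returns '', B raises KeyError
import Mathlib
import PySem

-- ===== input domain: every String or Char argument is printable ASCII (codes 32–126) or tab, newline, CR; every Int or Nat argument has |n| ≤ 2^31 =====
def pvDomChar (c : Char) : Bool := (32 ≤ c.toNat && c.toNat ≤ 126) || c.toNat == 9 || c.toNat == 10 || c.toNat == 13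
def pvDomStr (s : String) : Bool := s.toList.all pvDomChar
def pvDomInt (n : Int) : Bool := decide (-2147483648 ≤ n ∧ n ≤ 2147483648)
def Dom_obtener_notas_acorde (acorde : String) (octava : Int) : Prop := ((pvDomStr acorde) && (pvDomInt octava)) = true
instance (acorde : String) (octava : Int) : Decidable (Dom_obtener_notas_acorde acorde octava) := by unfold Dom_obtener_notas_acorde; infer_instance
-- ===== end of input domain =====

-- B replaces A's 24-branch if/elif chord table with a 12-entry note dict and the
-- triad interval formula (root, root+3/4, root+7 wrapped mod 12); objective: simpler.

-- ===== PORT A =====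
-- module constants of A
def pyA : Int := 9
def pyA_SOSTENIDO : Int := 10
def pyB : Int := 11
def pyC : Int := 12
def pyC_SOSTENIDO : Int := 1
def pyD : Int := 2
def pyD_SOSTENIDO : Int := 3
def pyE : Int := 4
def pyF : Int := 5
def pyF_SOSTENIDO : Int := 6
def pyG : Int := 7
def pyG_SOSTENIDO : Int := 8

def obtener_notas_acorde (acorde : String) (octava : Int) : List Int :=
  let triada : List Int :=
    if acorde == "A" then [pyA, pyC_SOSTENIDO, pyE]
    else if acorde == "A#" then [pyA_SOSTENIDO, pyD, pyF]
    else if acorde == "B" then [pyB, pyD_SOSTENIDO, pyF_SOSTENIDO]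
    else if acorde == "C" then [pyC, pyE, pyG]
    else if acorde == "C#" then [pyC_SOSTENIDO, pyF, pyG_SOSTENIDO]
    else if acorde == "D" then [pyD, pyF_SOSTENIDO, pyA]
    else if acorde == "D#" then [pyD_SOSTENIDO, pyG, pyA_SOSTENIDO]
    else if acorde == "E" then [pyE, pyG_SOSTENIDO, pyB]
    else if acorde == "F" then [pyF, pyA, pyC]
    else if acorde == "F#" then [pyF_SOSTENIDO, pyA_SOSTENIDO, pyC_SOSTENIDO]
    else if acorde == "G" then [pyG, pyB, pyD]
    else if acorde == "G#" then [pyG_SOSTENIDO, pyC, pyD_SOSTENIDO]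
    else if acorde == "Am" then [pyA, pyC, pyE]
    else if acorde == "A#m" then [pyA_SOSTENIDO, pyC_SOSTENIDO, pyF]
    else if acorde == "Bm" then [pyB, pyD, pyF_SOSTENIDO]
    else if acorde == "Cm" then [pyC, pyD_SOSTENIDO, pyG]
    else if acorde == "C#m" then [pyC_SOSTENIDO, pyE, pyG_SOSTENIDO]
    else if acorde == "Dm" then [pyD, pyF, pyA]
    else if acorde == "D#m" then [pyD_SOSTENIDO, pyF_SOSTENIDO, pyA_SOSTENIDO]
    else if acorde == "Em" then [pyE, pyG, pyB]
    else if acorde == "Fm" then [pyF, pyG_SOSTENIDO, pyC]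
    else if acorde == "F#m" then [pyF_SOSTENIDO, pyA, pyC_SOSTENIDO]
    else if acorde == "Gm" then [pyG, pyA_SOSTENIDO, pyD]
    else if acorde == "G#m" then [pyG_SOSTENIDO, pyB, pyD_SOSTENIDO]
    else []  -- fall-through: Python keeps the string and the += loop raises TypeError ("" returns ""); outside Pre_
  -- for i, nota in enumerate(acorde): acorde[i] = acorde[i] + 12*octava
  triada.map (fun n => n + 12 * octava)

-- ===== PORT B =====
def notasB : PySem.Dict String Int :=
  PySem.Dict.ofList [("C#", 1), ("D", 2), ("D#", 3), ("E", 4), ("F", 5), ("F#", 6),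
                     ("G", 7), ("G#", 8), ("A", 9), ("A#", 10), ("B", 11), ("C", 12)]

def obtener_notas_acorde_alt (acorde : String) (octava : Int) : List Int :=
  let p : String × Int :=
    if PySem.Str.endswith acorde "m" then
      (String.mk (PySem.List.slice acorde.toList none (some (-1))), 3)  -- acorde[:-1]
    else (acorde, 4)
  match notasB.get? p.1 with
  | none => []  -- Python raises KeyError here; outside Pre_
  | some r => [r, r + p.2, r + 7].map (fun v => PySem.Int.mod (v - 1) 12 + 1 + 12 * octava)

-- ===== PRECONDITION & SPEC =====
-- Pre_ excludes the non-chord strings: on every non-empty one A raises TypeError in the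
-- += loop, and on "" A returns the string "" — not a list of ints (B raises KeyError there).
def Pre_obtener_notas_acorde (acorde : String) (octava : Int) : Prop :=
  acorde ∈ ["A", "A#", "B", "C", "C#", "D", "D#", "E", "F", "F#", "G", "G#",
            "Am", "A#m", "Bm", "Cm", "C#m", "Dm", "D#m", "Em", "Fm", "F#m", "Gm", "G#m"]
instance (acorde : String) (octava : Int) : Decidable (Pre_obtener_notas_acorde acorde octava) := by
  unfold Pre_obtener_notas_acorde; infer_instance

def pvWitness_obtener_notas_acorde : String × Int := ("Cm", 4)

def Spec_obtener_notas_acorde (acorde : String) (octava : Int) (out : List Int) : Prop := out = obtener_notas_acorde_alt acorde octava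
instance (acorde : String) (octava : Int) (out : List Int) : Decidable (Spec_obtener_notas_acorde acorde octava out) := by unfold Spec_obtener_notas_acorde; infer_instance

-- ===== CLAIM (what is proved, stated in full; the proofs are below) =====
def Claim_equal_obtener_notas_acorde : Prop := ∀ (acorde : String) (octava : Int), Dom_obtener_notas_acorde acorde octava → Pre_obtener_notas_acorde acorde octava → Spec_obtener_notas_acorde acorde octava (obtener_notas_acorde acorde octava)

-- ===== LEMMAS AND PROOFS =====

-- ===== VERDICT (by name: the statement is the Claim_ definition above) =====
theorem obtener_notas_acorde_spec : Claim_equal_obtener_notas_acorde := by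
  intro acorde octava _ hpre
  unfold Spec_obtener_notas_acorde
  simp only [Pre_obtener_notas_acorde, List.mem_cons, List.not_mem_nil, or_false] at hpre
  rcases hpre with rfl|rfl|rfl|rfl|rfl|rfl|rfl|rfl|rfl|rfl|rfl|rfl|rfl|rfl|rfl|rfl|rfl|rfl|rfl|rfl|rfl|rfl|rfl|rfl <;> rfl
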